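-- pv_equiv track=rewrite | github.com/psj8532/problem_solving | BOJ/기타/두배열의합.py | get_sublist
-- ===== SOURCE A (Python) =====
-- def get_sublist(lst, size):
--     sum_dict = {}
--     for k in range(size):
--         for i in range(size - k):
--             sum_val = 0
--             for j in range(i, i + k + 1):
--                 sum_val += lst[j]
--             if sum_val in sum_dict: sum_dict[sum_val] += 1
--             else: sum_dict[sum_val] = 1
--     return sum_dict
-- ===== SOURCE B (Python) =====
-- def get_sublist(lst, size):
--     # Rolling window sums: for each length k+1 keep the list of window sums,
--     # updated incrementally from the previous length (O(n^2) instead of O(n^3)).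
--     counts = {}
--     sums = []
--     for k in range(size):
--         if k == 0:
--             sums = list(lst[:size])
--         else:
--             sums = [sums[i] + lst[i + k] for i in range(size - k)]
--         for s in sums:
--             counts[s] = counts.get(s, 0) + 1
--     return counts
-- ===== Notes on version B (the rewrite author's own statement) =====
-- stated objective: faster
-- what changed: B replaces A's per-subarray inner summation loop with rolling window sums: for each subarray length it derives the list of window sums incrementally from the previous length's sums, removing the innermost scan (intended as faster; a timing run measured ~5-6.7x at the sizes both completed).
import Mathlib
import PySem

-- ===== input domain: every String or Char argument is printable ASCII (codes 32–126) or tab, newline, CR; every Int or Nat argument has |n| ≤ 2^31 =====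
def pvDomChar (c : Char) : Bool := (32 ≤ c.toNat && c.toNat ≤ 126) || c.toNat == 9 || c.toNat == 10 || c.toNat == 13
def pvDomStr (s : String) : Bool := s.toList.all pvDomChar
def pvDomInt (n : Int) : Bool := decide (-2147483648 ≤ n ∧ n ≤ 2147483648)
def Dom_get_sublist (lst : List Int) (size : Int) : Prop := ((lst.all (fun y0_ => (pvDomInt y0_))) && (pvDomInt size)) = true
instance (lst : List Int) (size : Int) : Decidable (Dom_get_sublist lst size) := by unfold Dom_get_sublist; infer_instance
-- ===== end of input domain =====

-- B counts the same contiguous-subarray sums with rolling window sums per length (one pass per length)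
-- instead of A's fresh inner summation loop per subarray; same counts, same dict insertion order.
-- Intended as faster; a timing run measured ~5-6.7x at the sizes both implementations completed.

-- ===== PORT A =====
-- inner j-loop of A: sum_val = sum of lst[i..i+k]  (index in range under Pre_)
def pvSum (lst : List Int) (i k : Int) : Int :=
  (PySem.List.pyRange i (i + k + 1) 1).foldl (fun sum_val j => sum_val + PySem.List.pyGetD lst j 0) 0

-- body of A's outer k-loop (the i-loop)
def pvStepA (lst : List Int) (size : Int) (d : PySem.Dict Int Int) (k : Int) : PySem.Dict Int Int :=
  (PySem.List.pyRange 0 (size - k) 1).foldl (fun d i =>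
    let sum_val := pvSum lst i k
    if d.contains sum_val then d.insert sum_val (d.getD sum_val 0 + 1)
    else d.insert sum_val 1) d

def get_sublist (lst : List Int) (size : Int) : List (Int × Int) :=
  ((PySem.List.pyRange 0 size 1).foldl (pvStepA lst size) PySem.Dict.empty).items

-- ===== PORT B =====
-- counts[s] = counts.get(s, 0) + 1
def pvCount (d : PySem.Dict Int Int) (s : Int) : PySem.Dict Int Int := d.insert s (d.getD s 0 + 1)

-- body of B's k-loop: state = (counts, sums of the previous length)
def pvStepB (lst : List Int) (size : Int) (st : PySem.Dict Int Int × List Int) (k : Int) :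
    PySem.Dict Int Int × List Int :=
  let sums := if k = 0 then PySem.List.slice lst none (some size)
    else (PySem.List.pyRange 0 (size - k) 1).map
      (fun i => PySem.List.pyGetD st.2 i 0 + PySem.List.pyGetD lst (i + k) 0)
  (sums.foldl pvCount st.1, sums)

def get_sublist_alt (lst : List Int) (size : Int) : List (Int × Int) :=
  (((PySem.List.pyRange 0 size 1).foldl (pvStepB lst size) (PySem.Dict.empty, [])).1).items

-- ===== PRECONDITION & SPEC =====
-- Pre_ excludes exactly the inputs where A raises IndexError: 1 ≤ size but size > len(lst).
def Pre_get_sublist (lst : List Int) (size : Int) : Prop :=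
  size ≤ (lst.length : Int) ∨ size ≤ 0
instance (lst : List Int) (size : Int) : Decidable (Pre_get_sublist lst size) := by
  unfold Pre_get_sublist; infer_instance

def pvWitness_get_sublist : List Int × Int := ([1, -2, 3], 3)

def Spec_get_sublist (lst : List Int) (size : Int) (out : List (Int × Int)) : Prop :=
  out = get_sublist_alt lst size
instance (lst : List Int) (size : Int) (out : List (Int × Int)) : Decidable (Spec_get_sublist lst size out) := by
  unfold Spec_get_sublist; infer_instance

-- ===== CLAIM (what is proved, stated in full; the proofs are below) =====
def Claim_equal_get_sublist : Prop := ∀ (lst : List Int) (size : Int),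
  Dom_get_sublist lst size → Pre_get_sublist lst size →
  Spec_get_sublist lst size (get_sublist lst size)

-- ===== LEMMAS AND PROOFS =====

-- A's conditional counting step is pvCount (a missing key reads as 0)
lemma bump_eq (d : PySem.Dict Int Int) (s : Int) :
    (if d.contains s then d.insert s (d.getD s 0 + 1) else d.insert s 1) = pvCount d s := by
  unfold pvCount
  by_cases h : d.contains s = true
  · simp [h]
  · simp only [Bool.not_eq_true] at h
    rw [if_neg (by simp [h]), PySem.Dict.getD_of_not_contains d 0 h]
    norm_num

-- A's i-loop at stage k is B's counting fold over the list of window sums of length k+1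
lemma stepA_eq (lst : List Int) (size k : Int) (d : PySem.Dict Int Int) :
    pvStepA lst size d k
      = ((PySem.List.pyRange 0 (size - k) 1).map (fun i => pvSum lst i k)).foldl pvCount d := by
  rw [List.foldl_map]
  unfold pvStepA
  exact List.foldl_ext _ _ d (fun d' i _ => bump_eq d' (pvSum lst i k))

-- window-sum recurrence
lemma pvSum_succ (lst : List Int) (i k : Int) (hk : 0 ≤ k) :
    pvSum lst i (k + 1) = pvSum lst i k + PySem.List.pyGetD lst (i + k + 1) 0 := by
  unfold pvSum
  rw [show i + (k + 1) + 1 = (i + k + 1) + 1 by ring,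
      PySem.List.pyRange_one_succ_right (show i ≤ i + k + 1 by omega), List.foldl_append]
  simp

-- lst[:size] is the list of length-1 window sums
lemma sums0 (lst : List Int) (size : Int) (h0 : 0 ≤ size) (hlen : size ≤ (lst.length : Int)) :
    PySem.List.slice lst none (some size)
      = (PySem.List.pyRange 0 size 1).map (fun i => pvSum lst i 0) := by
  have hs : size = ((size.toNat : Nat) : Int) := by omega
  rw [hs, PySem.List.slice_to_natCast]
  apply List.ext_getElem
  · simp [PySem.List.length_pyRange_one]; omega
  · intro m h1 h2
    rw [List.getElem_take, List.getElem_map, PySem.List.getElem_pyRange_one]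
    unfold pvSum
    rw [show (0:Int) + m + 0 + 1 = ((0:Int) + m) + 1 by ring, PySem.List.pyRange_one_singleton]
    simp only [List.foldl_cons, List.foldl_nil, zero_add]
    rw [PySem.List.pyGetD_eq_getElem lst 0 (by omega) (by simp at h1 ⊢; omega)]
    simp

-- B's recomputed sums at stage k equal the length-(k+1) window sums
lemma sumsNext (lst : List Int) (size k : Int) (hk : 1 ≤ k) :
    (PySem.List.pyRange 0 (size - k) 1).map
        (fun i => PySem.List.pyGetD ((PySem.List.pyRange 0 (size - (k - 1)) 1).map (fun i => pvSum lst i (k - 1))) i 0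
          + PySem.List.pyGetD lst (i + k) 0)
      = (PySem.List.pyRange 0 (size - k) 1).map (fun i => pvSum lst i k) := by
  apply List.map_congr_left
  intro i hi
  rw [PySem.List.mem_pyRange_one] at hi
  rw [PySem.List.pyGetD_map_pyRange_of_nonneg _ _ _ _ hi.1 (by omega)]
  have := pvSum_succ lst i (k - 1) (by omega)
  rw [show k - 1 + 1 = k by ring, show i + (k - 1) + 1 = i + k by ring] at this
  omega

-- main loop invariant: from stage k ≥ 1 on, A's fold and B's fold produce the same dict
lemma loop_eq (lst : List Int) (size : Int) : ∀ (m : Nat) (k : Int) (d : PySem.Dict Int Int),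
    1 ≤ k → size - k ≤ (m : Int) →
    (PySem.List.pyRange k size 1).foldl (pvStepA lst size) d
      = ((PySem.List.pyRange k size 1).foldl (pvStepB lst size)
          (d, (PySem.List.pyRange 0 (size - (k - 1)) 1).map (fun i => pvSum lst i (k - 1)))).1 := by
  intro m
  induction m with
  | zero =>
    intro k d hk hm
    rw [PySem.List.pyRange_one_eq_nil (by omega)]
    rfl
  | succ m ih =>
    intro k d hk hm
    by_cases hks : k < size
    · rw [PySem.List.pyRange_one_cons hks]
      simp only [List.foldl_cons]
      have hstep : pvStepB lst size
            (d, (PySem.List.pyRange 0 (size - (k - 1))).map (fun i => pvSum lst i (k - 1))) k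
          = (((PySem.List.pyRange 0 (size - k)).map (fun i => pvSum lst i k)).foldl pvCount d,
             (PySem.List.pyRange 0 (size - k)).map (fun i => pvSum lst i k)) := by
        unfold pvStepB
        rw [if_neg (by omega)]
        rw [sumsNext lst size k hk]
      rw [hstep, stepA_eq]
      have := ih (k + 1) (((PySem.List.pyRange 0 (size - k)).map (fun i => pvSum lst i k)).foldl pvCount d)
        (by omega) (by push_cast at hm ⊢; omega)
      simpa [show k + 1 - 1 = k by ring] using this
    · rw [PySem.List.pyRange_one_eq_nil (by omega)]
      rfl

-- ===== VERDICT (by name: the statement is the Claim_ definition above) =====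
theorem get_sublist_spec : Claim_equal_get_sublist := by
  intro lst size _ hpre
  unfold Spec_get_sublist get_sublist get_sublist_alt
  by_cases hs : size ≤ 0
  · rw [PySem.List.pyRange_one_eq_nil hs]
    rfl
  · have hlen : size ≤ (lst.length : Int) := by
      cases hpre with
      | inl h => exact h
      | inr h => omega
    rw [PySem.List.pyRange_one_cons (show (0:Int) < size by omega)]
    simp only [List.foldl_cons]
    have hB0 : pvStepB lst size (PySem.Dict.empty, []) 0
        = (((PySem.List.pyRange 0 size).map (fun i => pvSum lst i 0)).foldl pvCount PySem.Dict.empty,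
           (PySem.List.pyRange 0 size).map (fun i => pvSum lst i 0)) := by
      unfold pvStepB
      rw [if_pos rfl, sums0 lst size (by omega) hlen]
    rw [hB0, stepA_eq]
    simp only [sub_zero, zero_add]
    have := loop_eq lst size (size - 1).toNat 1
      (((PySem.List.pyRange 0 (size - 0)).map (fun i => pvSum lst i 0)).foldl pvCount PySem.Dict.empty)
      (le_refl 1) (by omega)
    simp only [show (1:Int) - 1 = 0 by ring, sub_zero] at this
    rw [this]
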